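-- pv_equiv track=rewrite | github.com/RealGT1/L | d2_operations.py | extract_service_from_key
-- ===== SOURCE A (Python) =====
-- def extract_service_from_key(key):
--     """
--     Extract service from object key path
--
--     Example:
--     - Input key: "/vulpix/db/ves.io.pikachu.version.Object.default/primary/uid"
--     - Output service: "vulpix"
--
--     Args:
--         key: The full object key path
--
--     Returns:
--         str: Extracted service name or None if not found
--     """
--     # Check for valid key
--     if not key or not isinstance(key, str):
--         return None
--
--     # Split the key into path segments
--     parts = key.split('/')
--
--     # The service should be in the first non-empty segment
--     # Usually at index 1 in the path /service/db/...
--     for part in parts: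
--         if part and part != "":
--             return part
--
--     return None
-- ===== SOURCE B (Python) =====
-- def extract_service_from_key(key):
--     # Single pass over the characters: skip leading '/', collect the first
--     # run of non-'/' characters, stop at the next '/'.
--     if not key or not isinstance(key, str):
--         return None
--     service = []
--     for ch in key:
--         if ch == '/':
--             if service:
--                 break
--         else:
--             service.append(ch)
--     return ''.join(service) if service else None
-- ===== Notes on version B (the rewrite author's own statement) =====
-- stated objective: alternative
-- what changed: Replaces splitting the key into a list of segments plus a search loop over the parts with a single character-level scan that skips the leading slashes and accumulates the first run of non-slash characters.
import Mathlib
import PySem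

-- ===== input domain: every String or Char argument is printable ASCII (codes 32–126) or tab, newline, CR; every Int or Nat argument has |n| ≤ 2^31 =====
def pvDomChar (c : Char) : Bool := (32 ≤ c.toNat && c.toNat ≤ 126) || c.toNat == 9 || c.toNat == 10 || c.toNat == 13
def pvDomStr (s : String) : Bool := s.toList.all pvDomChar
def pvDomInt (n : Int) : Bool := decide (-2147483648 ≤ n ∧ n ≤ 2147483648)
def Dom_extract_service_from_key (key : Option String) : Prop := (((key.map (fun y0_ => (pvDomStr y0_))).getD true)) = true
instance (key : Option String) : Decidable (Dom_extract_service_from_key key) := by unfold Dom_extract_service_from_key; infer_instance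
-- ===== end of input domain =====

-- B replaces A's split-into-segments-plus-search-loop by one character-level scan; return values proved equal on all inputs.

-- ===== PORT A =====
-- 'for part in parts: if part and part != "": return part' / 'return None'
def pvPartsLoop : List String → Option String
  | [] => none
  | p :: ps => if p ≠ "" ∧ p ≠ "" then some p else pvPartsLoop ps

def extract_service_from_key (key : Option String) : Option String :=
  match key with
  | none => none                                   -- 'not key' (None) / non-str
  | some s =>
    if s = "" then none                            -- 'not key' (empty string)
    else
      -- parts = key.split('/')  (non-empty literal separator)
      let parts := (PySem.Chars.splitOn s.toList "/".toList).map String.ofList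
      pvPartsLoop parts

-- ===== PORT B =====
-- the for-loop of Source B: skip leading '/', accumulate the first non-'/' run, break at the next '/'
def pvBScan : List Char → List Char → List Char
  | [], service => service
  | c :: rest, service =>
    if c = '/' then (if service ≠ [] then service else pvBScan rest service)
    else pvBScan rest (service ++ [c])

def extract_service_from_key_alt (key : Option String) : Option String :=
  match key with
  | none => none
  | some s =>
    if s = "" then none
    else
      let service := pvBScan s.toList []
      if service ≠ [] then some (String.ofList service) else none

-- ===== PRECONDITION & SPEC =====
def Spec_extract_service_from_key (key : Option String) (out : Option String) : Prop := out = extract_service_from_key_alt key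
instance (key : Option String) (out : Option String) : Decidable (Spec_extract_service_from_key key out) := by unfold Spec_extract_service_from_key; infer_instance

-- ===== CLAIM (what is proved, stated in full; the proofs are below) =====
def Claim_equal_extract_service_from_key : Prop := ∀ (key : Option String), Dom_extract_service_from_key key → Spec_extract_service_from_key key (extract_service_from_key key)

-- ===== LEMMAS AND PROOFS =====

-- proof-side mirror of A's loop, on the list-of-chars side
def pvFirstNE : List (List Char) → Option (List Char)
  | [] => none
  | p :: ps => if p ≠ [] then some p else pvFirstNE ps

-- the value both programs compute: first non-'/' run after the leading slashes
def pvSeg (cs : List Char) : List Char :=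
  (cs.dropWhile (· == '/')).takeWhile (fun c => c ≠ '/')

theorem pvFirstNE_append (xs ys : List (List Char)) :
    pvFirstNE (xs ++ ys) = (pvFirstNE xs).or (pvFirstNE ys) := by
  induction xs with
  | nil => simp [pvFirstNE]
  | cons p ps ih =>
    by_cases h : p = [] <;> simp [pvFirstNE, h, ih]

theorem pvPartsLoop_map (ps : List (List Char)) :
    pvPartsLoop (ps.map String.ofList) = (pvFirstNE ps).map String.ofList := by
  induction ps with
  | nil => simp [pvPartsLoop, pvFirstNE]
  | cons p ps ih =>
    by_cases h : p = []
    · subst h; simp [pvPartsLoop, pvFirstNE, ih]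
    · have h' : String.ofList p ≠ "" := by
        intro hc
        have := congrArg String.toList hc
        simp at this
        exact h this
      simp [pvPartsLoop, pvFirstNE, h, h']

theorem pvGo_firstNE (fuel : Nat) :
    ∀ (cs cur : List Char) (acc : List (List Char)), cs.length < fuel →
    pvFirstNE (PySem.Chars.splitOn.go ['/'] fuel cs cur acc) =
      (pvFirstNE acc.reverse).or
        (if cur = [] then (if pvSeg cs = [] then none else some (pvSeg cs))
         else some (cur.reverse ++ cs.takeWhile (fun c => c ≠ '/'))) := by
  induction fuel with
  | zero => intro cs cur acc h; omega
  | succ fuel ih =>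
    intro cs cur acc h
    match cs with
    | [] =>
      simp only [PySem.Chars.splitOn.go]
      rw [List.reverse_cons, pvFirstNE_append]
      by_cases hc : cur = []
      · simp [hc, pvFirstNE, pvSeg]
      · have : cur.reverse ≠ [] := by simpa using hc
        simp [hc, pvFirstNE, this, Option.or]
    | c :: rest =>
      by_cases hc : c = '/'
      · subst hc
        have hpre : List.isPrefixOf ['/'] ('/' :: rest) = true := by
          simp [List.isPrefixOf]
        simp only [PySem.Chars.splitOn.go, hpre, if_true]
        rw [show List.drop (['/'] : List Char).length ('/' :: rest) = rest from rfl]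
        have hlen : rest.length < fuel := by simp at h; omega
        rw [ih rest [] (cur.reverse :: acc) hlen]
        rw [List.reverse_cons, pvFirstNE_append]
        have hseg : pvSeg ('/' :: rest) = pvSeg rest := by simp [pvSeg]
        by_cases hcur : cur = []
        · simp [hcur, pvFirstNE, hseg]
        · have hrv : cur.reverse ≠ [] := by simpa using hcur
          simp only [if_neg hcur]
          simp [pvFirstNE, hrv, Option.or]
          cases pvFirstNE acc.reverse <;> rfl
      · have hpre : List.isPrefixOf ['/'] (c :: rest) = false := by
          simp [List.isPrefixOf]
          intro hcc; exact absurd hcc.symm hc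
        simp only [PySem.Chars.splitOn.go, hpre, Bool.false_eq_true, if_false]
        have hlen : rest.length < fuel := by simp at h; omega
        rw [ih rest (c :: cur) acc hlen]
        by_cases hcur : cur = []
        · subst hcur
          simp [pvSeg, hc]
        · simp [hcur, hc]

theorem pvScan_ne (cs : List Char) :
    ∀ service : List Char, service ≠ [] →
    pvBScan cs service = service ++ cs.takeWhile (fun c => c ≠ '/') := by
  induction cs with
  | nil => intro s _; simp [pvBScan]
  | cons c rest ih =>
    intro s hs
    by_cases hc : c = '/'
    · subst hc; simp [pvBScan, hs]
    · have htw : (c :: rest).takeWhile (fun x => x ≠ '/') = c :: rest.takeWhile (fun x => x ≠ '/') := by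
        simp [hc]
      simp only [pvBScan, if_neg hc]
      rw [ih (s ++ [c]) (by simp), htw]
      simp

theorem pvScan_nil (cs : List Char) : pvBScan cs [] = pvSeg cs := by
  induction cs with
  | nil => simp [pvBScan, pvSeg]
  | cons c rest ih =>
    by_cases hc : c = '/'
    · subst hc
      simp [pvBScan, pvSeg] at ih ⊢
      exact ih
    · have hdw : (c :: rest).dropWhile (· == '/') = c :: rest := by
        simp [hc]
      simp only [pvBScan, if_neg hc]
      simp only [List.nil_append]
      rw [pvScan_ne rest [c] (by simp)]
      simp [pvSeg, hdw, hc]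

-- ===== VERDICT (by name: the statement is the Claim_ definition above) =====
theorem extract_service_from_key_spec : Claim_equal_extract_service_from_key := by
  intro key _
  unfold Spec_extract_service_from_key extract_service_from_key extract_service_from_key_alt
  match key with
  | none => rfl
  | some s =>
    by_cases hs : s = ""
    · simp [hs]
    · simp only [if_neg hs]
      rw [show ("/" : String).toList = ['/'] from rfl, pvPartsLoop_map]
      rw [show PySem.Chars.splitOn s.toList ['/'] =
            PySem.Chars.splitOn.go ['/'] (s.toList.length + 1) s.toList [] [] from rfl]
      rw [pvGo_firstNE (s.toList.length + 1) s.toList [] [] (by omega)]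
      rw [pvScan_nil]
      by_cases hseg : pvSeg s.toList = []
      · simp [pvFirstNE, hseg]
      · simp [pvFirstNE, hseg]
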